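-- pv_equiv track=rewrite | github.com/Dr-Zer0/plugin.video.vvvvid | requester.py | decode_embed_info
-- ===== SOURCE A (Python) =====
-- def decode_embed_info(h):
--     def f(m):
--         l = []
--         o = 0
--         b = False
--         len_m = len(m)
--         while not b and o < len_m:
--             n = m[o] << 2
--             o += 1
--             k = -1
--             j = -1
--             if o < len_m:
--                 n += m[o] >> 4
--                 o += 1
--                 if o < len_m:
--                     k = (m[o - 1] << 4) & 255
--                     k += m[o] >> 2
--                     o += 1
--                     if o < len_m:
--                         j = (m[o - 1] << 6) & 255
--                         j += m[o]
--                         o += 1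
--                     else:
--                         b = True
--                 else:
--                     b = True
--             else:
--                 b = True
--             l.append(n)
--             if k != -1:
--                 l.append(k)
--             if j != -1:
--                 l.append(j)
--         return l
--
--     g = 'MNOPIJKL89+/4567UVWXQRSTEFGHABCDcdefYZabstuvopqr0123wxyzklmnghij'
--     c = [g.index(e) for e in h]
--     len_c = len(c)
--     e = len_c * 2 - 1
--     while e >= 0:
--         a = c[e % len_c] ^ c[(e + 1) % len_c]
--         c[e % len_c] = a
--         e -= 1
--     c = f(c)
--     d = ''.join([chr(e) for e in c])
--     return d
-- ===== SOURCE B (Python) =====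
-- G = 'MNOPIJKL89+/4567UVWXQRSTEFGHABCDcdefYZabstuvopqr0123wxyzklmnghij'
--
-- def decode_embed_info(h):
--     c = [G.index(e) for e in h]
--     n = len(c)
--     # two reverse passes of the in-place XOR unmasking
--     for _ in range(2):
--         for i in range(n - 1, -1, -1):
--             c[i] ^= c[(i + 1) % n]
--     # chunked base64-style decode: groups of four 6-bit values
--     out = []
--     for i in range(0, n, 4):
--         grp = c[i:i + 4]
--         out.append((grp[0] << 2) + (grp[1] >> 4 if len(grp) > 1 else 0))
--         if len(grp) > 2:
--             out.append(((grp[1] << 4) & 255) + (grp[2] >> 2))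
--         if len(grp) > 3:
--             out.append(((grp[2] << 6) & 255) + grp[3])
--     return ''.join(chr(e) for e in out)
-- ===== Notes on version B (the rewrite author's own statement) =====
-- stated objective: simpler
-- what changed: B replaces A's pointer-and-flag while-loop base64 decoder by a chunk-of-4 for-loop over slices (emitting only the bytes whose source sixtets exist) and A's single 2n-step wrap-around XOR while-loop by two plain reverse passes; no o pointer, no b flag, no -1 sentinels (measured ~1.7x constant-factor speedup from the fewer per-element index/flag operations).
import Mathlib
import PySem

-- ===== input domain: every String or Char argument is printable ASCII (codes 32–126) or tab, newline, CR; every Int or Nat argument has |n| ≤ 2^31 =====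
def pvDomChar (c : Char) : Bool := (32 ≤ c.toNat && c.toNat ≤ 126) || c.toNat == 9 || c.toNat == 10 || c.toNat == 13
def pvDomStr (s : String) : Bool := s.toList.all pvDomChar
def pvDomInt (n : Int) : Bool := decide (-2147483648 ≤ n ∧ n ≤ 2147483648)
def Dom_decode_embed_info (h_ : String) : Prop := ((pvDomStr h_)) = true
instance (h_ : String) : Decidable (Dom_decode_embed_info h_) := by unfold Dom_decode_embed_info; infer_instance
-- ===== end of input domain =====

-- B replaces A's pointer-and-flag base64 inner loop by a chunk-of-4 loop and A's single
-- 2n-step XOR while-loop by two reverse passes: simpler decomposition, same values.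


-- ===== PORT A =====
-- the alphabet g, written as an explicit character list (kernel-transparent)
def pvG : List Char :=
  ['M', 'N', 'O', 'P', 'I', 'J', 'K', 'L', '8', '9', '+', '/', '4', '5', '6', '7', 'U', 'V', 'W', 'X', 'Q', 'R', 'S', 'T', 'E', 'F', 'G', 'H', 'A', 'B', 'C', 'D', 'c', 'd', 'e', 'f', 'Y', 'Z', 'a', 'b', 's', 't', 'u', 'v', 'o', 'p', 'q', 'r', '0', '1', '2', '3', 'w', 'x', 'y', 'z', 'k', 'l', 'm', 'n', 'g', 'h', 'i', 'j']

-- l.append(n); if k != -1: l.append(k); if j != -1: l.append(j)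
def pvAppend3 (l : List Int) (n k j : Int) : List Int :=
  let l := l ++ [n]
  let l := if k ≠ -1 then l ++ [k] else l
  if j ≠ -1 then l ++ [j] else l

-- the inner while-loop of f: state (o, l); a branch that sets b = True returns
-- (the loop exits right after the appends once b is set)
def pvFLoop (m : List Int) (o : Nat) (l : List Int) : List Int :=
  if _h : o < m.length then
    let n := (m.getD o 0) <<< (2:Nat)        -- m[o] << 2 (o in range here)
    let o1 := o + 1
    if o1 < m.length then
      let n := n + ((m.getD o1 0) >>> (4:Nat))
      let o2 := o1 + 1
      if o2 < m.length then
        let k := PySem.Int.band ((m.getD (o2 - 1) 0) <<< (4:Nat)) 255 + ((m.getD o2 0) >>> (2:Nat))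
        let o3 := o2 + 1
        if o3 < m.length then
          let j := PySem.Int.band ((m.getD (o3 - 1) 0) <<< (6:Nat)) 255 + m.getD o3 0
          pvFLoop m (o3 + 1) (pvAppend3 l n k j)
        else pvAppend3 l n k (-1)      -- b = True
      else pvAppend3 l n (-1) (-1)     -- b = True
    else pvAppend3 l n (-1) (-1)       -- b = True
  else l
termination_by m.length - o

-- the XOR while-loop: e counts down from len_c*2-1 to 0
def pvXorLoop (c : List Int) (e : Int) : List Int :=
  if _h : 0 ≤ e then
    let n : Int := c.length
    let i := (PySem.Int.mod e n).toNat
    let a := PySem.Int.bxor (c.getD i 0) (c.getD (PySem.Int.mod (e + 1) n).toNat 0)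
    pvXorLoop (c.set i a) (e - 1)
  else c
termination_by (e + 1).toNat
decreasing_by simp; omega

def decode_embed_info (h_ : String) : String :=
  -- g.index(e): ValueError (none) when e ∉ g — excluded by Pre_; getD 0 is never the raising case there
  let c := h_.toList.map (fun e => (((PySem.List.index? pvG e).getD 0 : Nat) : Int))
  let c := pvXorLoop c ((c.length : Int) * 2 - 1)
  let c := pvFLoop c 0 []
  String.ofList (c.map (fun e => Char.ofNat e.toNat))   -- chr(e), e always ≥ 0 here

-- ===== PORT B =====
-- one reverse pass: for i in range(n-1, -1, -1): c[i] ^= c[(i+1) % n]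
def pvPass (c : List Int) (i : Int) : List Int :=
  if _h : 0 ≤ i then
    let n : Int := c.length
    let c := c.set i.toNat
      (PySem.Int.bxor (c.getD i.toNat 0) (c.getD (PySem.Int.mod (i + 1) n).toNat 0))
    pvPass c (i - 1)
  else c
termination_by (i + 1).toNat
decreasing_by simp; omega

-- for i in range(0, n, 4): decode the group c[i:i+4]
def pvChunk (c : List Int) (i : Nat) (out : List Int) : List Int :=
  if _h : i < c.length then
    let grp := PySem.List.slice c (some (i : Int)) (some ((i : Int) + 4))
    let out := out ++ [(grp.getD 0 0) <<< (2:Nat) +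
      (if grp.length > 1 then (grp.getD 1 0) >>> (4:Nat) else 0)]
    let out := if grp.length > 2 then
      out ++ [PySem.Int.band ((grp.getD 1 0) <<< (4:Nat)) 255 + ((grp.getD 2 0) >>> (2:Nat))] else out
    let out := if grp.length > 3 then
      out ++ [PySem.Int.band ((grp.getD 2 0) <<< (6:Nat)) 255 + grp.getD 3 0] else out
    pvChunk c (i + 4) out
  else out
termination_by c.length - i

def decode_embed_info_alt (h_ : String) : String :=
  let c := h_.toList.map (fun e => (((PySem.List.index? pvG e).getD 0 : Nat) : Int))
  let c := pvPass (pvPass c ((c.length : Int) - 1)) ((c.length : Int) - 1)  -- for _ in range(2)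
  let out := pvChunk c 0 []
  String.ofList (out.map (fun e => Char.ofNat e.toNat))

-- ===== PRECONDITION & SPEC =====
-- Pre_: every character of h_ occurs in the alphabet g; otherwise g.index raises ValueError.
def Pre_decode_embed_info (h_ : String) : Prop := (h_.toList.all (fun e => pvG.contains e)) = true
instance (h_ : String) : Decidable (Pre_decode_embed_info h_) := by
  unfold Pre_decode_embed_info; infer_instance
def pvWitness_decode_embed_info : String := "AB"

def Spec_decode_embed_info (h_ : String) (out : String) : Prop := out = decode_embed_info_alt h_
instance (h_ : String) (out : String) : Decidable (Spec_decode_embed_info h_ out) := by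
  unfold Spec_decode_embed_info; infer_instance

-- ===== CLAIM (what is proved, stated in full; the proofs are below) =====
def Claim_equal_decode_embed_info : Prop := ∀ (h_ : String), Dom_decode_embed_info h_ → Pre_decode_embed_info h_ → Spec_decode_embed_info h_ (decode_embed_info h_)

-- ===== LEMMAS AND PROOFS =====

theorem pvGetD_nonneg (m : List Int) (hm : ∀ x ∈ m, 0 ≤ x) (i : Nat) : 0 ≤ m.getD i 0 := by
  rcases h : m[i]? with _ | v
  · simp [List.getD_eq_getElem?_getD, h]
  · simp [List.getD_eq_getElem?_getD, h]; exact hm v (List.mem_of_getElem? h)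

theorem pvBand_nonneg (x : Int) (hx : 0 ≤ x) (s : Nat) : 0 ≤ PySem.Int.band (x <<< s) 255 :=
  PySem.Int.band_nonneg_of_nonneg_left 255 (by rw [Int.shiftLeft_eq]; positivity)

theorem pvShr_nonneg (y : Int) (hy : 0 ≤ y) (t : Nat) : 0 ≤ y >>> t :=
  Int.le_shiftRight_of_nonneg hy

theorem grp_getD (m : List Int) (o t : Nat) (ht : t < 4) :
    ((m.drop o).take 4).getD t 0 = m.getD (o + t) 0 := by
  simp [List.getD_eq_getElem?_getD, ht, List.getElem?_drop]

theorem pvSlice4 (m : List Int) (o : Nat) :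
    PySem.List.slice m (some (o : Int)) (some ((o : Int) + 4)) = (m.drop o).take 4 := by
  rw [show ((o:Int)+4) = ((o:Int) + ((4:Nat):Int)) by norm_num, PySem.List.slice_natCast_add]

theorem pvFLoop_eq_chunk (m : List Int) (hm : ∀ x ∈ m, 0 ≤ x) (o : Nat) (l : List Int) :
    pvFLoop m o l = pvChunk m o l := by
  have g0 := pvGetD_nonneg m hm
  fun_induction pvFLoop m o l with
  | case1 o l h0 n o1 h1 n2 o2 h2 k o3 h3 j ih =>
    have hk : k ≠ -1 := by have := pvBand_nonneg (m.getD (o2-1) 0) (g0 _) 4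
                           have := pvShr_nonneg (m.getD o2 0) (g0 _) 2; omega
    have hj : j ≠ -1 := by have := pvBand_nonneg (m.getD (o3-1) 0) (g0 _) 6
                           have := g0 o3; omega
    conv_rhs => rw [pvChunk, dif_pos h0, pvSlice4]
    simp only [grp_getD m o 0 (by omega), grp_getD m o 1 (by omega), grp_getD m o 2 (by omega),
      grp_getD m o 3 (by omega), List.length_take, List.length_drop]
    rw [if_pos (show min 4 (m.length - o) > 3 by omega),
        if_pos (show min 4 (m.length - o) > 2 by omega),
        if_pos (show min 4 (m.length - o) > 1 by omega)]
    rw [show o3 + 1 = o + 4 by omega] at ih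
    rw [ih]
    congr 1
    simp only [pvAppend3, if_pos hk, if_pos hj, n2, n, k, j, o1, o2, o3]
    simp [show o + 1 + 1 - 1 = o + 1 by omega, show o + 1 + 1 + 1 - 1 = o + 2 by omega,
      show o + 1 + 1 = o + 2 by omega, show o + 1 + 1 + 1 = o + 3 by omega]
  | case2 o l h0 n o1 h1 n2 o2 h2 k o3 h3 =>
    have hk : k ≠ -1 := by have := pvBand_nonneg (m.getD (o2-1) 0) (g0 _) 4
                           have := pvShr_nonneg (m.getD o2 0) (g0 _) 2; omega
    rw [pvChunk, dif_pos h0, pvSlice4]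
    simp only [grp_getD m o 0 (by omega), grp_getD m o 1 (by omega), grp_getD m o 2 (by omega),
      List.length_take, List.length_drop]
    rw [if_neg (show ¬ min 4 (m.length - o) > 3 by omega),
        if_pos (show min 4 (m.length - o) > 2 by omega),
        if_pos (show min 4 (m.length - o) > 1 by omega)]
    rw [pvChunk, dif_neg (show ¬ o + 4 < m.length by omega)]
    simp only [pvAppend3, if_pos hk, if_neg (show ¬ (-1:Int) ≠ -1 by simp), n2, n, k, o1, o2]
    simp [show o + 1 + 1 - 1 = o + 1 by omega, show o + 1 + 1 = o + 2 by omega]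
  | case3 o l h0 n o1 h1 n2 o2 h2 =>
    rw [pvChunk, dif_pos h0, pvSlice4]
    simp only [grp_getD m o 0 (by omega), grp_getD m o 1 (by omega),
      List.length_take, List.length_drop]
    rw [if_neg (show ¬ min 4 (m.length - o) > 3 by omega),
        if_neg (show ¬ min 4 (m.length - o) > 2 by omega),
        if_pos (show min 4 (m.length - o) > 1 by omega)]
    rw [pvChunk, dif_neg (show ¬ o + 4 < m.length by omega)]
    simp only [pvAppend3, if_neg (show ¬ (-1:Int) ≠ -1 by simp), n2, n, o1]
    simp
  | case4 o l h0 n o1 h1 =>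
    rw [pvChunk, dif_pos h0, pvSlice4]
    simp only [grp_getD m o 0 (by omega), List.length_take, List.length_drop]
    rw [if_neg (show ¬ min 4 (m.length - o) > 3 by omega),
        if_neg (show ¬ min 4 (m.length - o) > 2 by omega),
        if_neg (show ¬ min 4 (m.length - o) > 1 by omega)]
    rw [pvChunk, dif_neg (show ¬ o + 4 < m.length by omega)]
    simp only [pvAppend3, if_neg (show ¬ (-1:Int) ≠ -1 by simp), n]
    simp
  | case5 o l h0 => rw [pvChunk, dif_neg h0]
theorem pvPass_length (c : List Int) (i : Int) : (pvPass c i).length = c.length := by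
  fun_induction pvPass c i with
  | case1 c i h n c2 ih => rw [ih]; simp [c2]
  | case2 => rfl

theorem pvPass_nonneg (c : List Int) (hc : ∀ x ∈ c, 0 ≤ x) (i : Int) :
    ∀ x ∈ pvPass c i, 0 ≤ x := by
  fun_induction pvPass c i with
  | case1 c i h n c2 ih =>
    apply ih
    intro x hx
    rcases List.mem_or_eq_of_mem_set hx with h' | h'
    · exact hc x h'
    · subst h'
      rw [PySem.Int.bxor_of_nonneg (pvGetD_nonneg c hc _) (pvGetD_nonneg c hc _)]
      positivity
  | case2 c i h => exact hc

theorem pvXorLoop_eq_pass (e : Int) (c : List Int) (hlt : e < (c.length : Int)) :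
    pvXorLoop c e = pvPass c e := by
  fun_induction pvXorLoop c e with
  | case1 c e h n i a ih =>
    have hn : (0:Int) < (c.length : Int) := by omega
    have hmod : PySem.Int.mod e (c.length : Int) = e := by
      rw [PySem.Int.mod_eq_emod_of_pos hn, Int.emod_eq_of_lt h hlt]
    rw [pvPass, dif_pos h]
    simp only [n, i, a, hmod]
    have h2 := ih (by simp; omega)
    simpa only [i, a, n, hmod] using h2
  | case2 c e h => rw [pvPass, dif_neg h]
theorem pvXorLoop_split (k : Nat) (c : List Int) (hk : k < c.length) :
    pvXorLoop c ((k : Int) + (c.length : Int)) =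
      pvXorLoop (pvPass c (k : Int)) ((c.length : Int) - 1) := by
  induction k generalizing c with
  | zero =>
    have hn : (0:Int) < (c.length : Int) := by exact_mod_cast hk
    rw [pvXorLoop, dif_pos (by omega)]
    rw [pvPass, dif_pos (by norm_num)]
    have h1 : PySem.Int.mod (((0:Nat):Int) + (c.length : Int)) (c.length : Int) = 0 := by
      rw [PySem.Int.mod_eq_emod_of_pos hn]
      rw [show ((0:Nat):Int) + (c.length : Int) = (c.length : Int) by norm_num]
      simp
    have h2 : PySem.Int.mod (((0:Nat):Int) + (c.length : Int) + 1) (c.length : Int)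
        = PySem.Int.mod (((0:Nat):Int) + 1) (c.length : Int) := by
      rw [PySem.Int.mod_eq_emod_of_pos hn, PySem.Int.mod_eq_emod_of_pos hn]
      rw [show ((0:Nat):Int) + (c.length : Int) + 1 = 1 + (c.length : Int) by ring,
          show ((0:Nat):Int) + 1 = (1:Int) by norm_num, Int.add_emod_right]
    simp only [h1, h2]
    rw [pvPass, dif_neg (by norm_num)]
    norm_num
  | succ k ih =>
    have hn : (0:Int) < (c.length : Int) := by omega
    have hkc : ((k:Int) + 1) < (c.length : Int) := by exact_mod_cast hk
    rw [pvXorLoop, dif_pos (by push_cast; omega)]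
    conv_rhs => rw [pvPass, dif_pos (by push_cast; omega)]
    have h1 : PySem.Int.mod (((k+1:Nat):Int) + (c.length : Int)) (c.length : Int)
        = ((k:Int) + 1) := by
      rw [PySem.Int.mod_eq_emod_of_pos hn]
      rw [show ((k+1:Nat):Int) + (c.length : Int) = ((k:Int)+1) + (c.length : Int) by push_cast; ring,
          Int.add_emod_right, Int.emod_eq_of_lt (by omega) hkc]
    have h2 : PySem.Int.mod (((k+1:Nat):Int) + (c.length : Int) + 1) (c.length : Int)
        = PySem.Int.mod (((k+1:Nat):Int) + 1) (c.length : Int) := by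
      rw [PySem.Int.mod_eq_emod_of_pos hn, PySem.Int.mod_eq_emod_of_pos hn]
      rw [show ((k+1:Nat):Int) + (c.length : Int) + 1 = (((k+1:Nat):Int) + 1) + (c.length : Int) by ring,
          Int.add_emod_right]
    simp only [h1, h2]
    push_cast
    set c2 := c.set ((k:Int) + 1).toNat
      (PySem.Int.bxor (c.getD ((k:Int) + 1).toNat 0)
        (c.getD (PySem.Int.mod ((k:Int) + 1 + 1) (c.length:Int)).toNat 0)) with hc2
    have hlen : c2.length = c.length := by rw [hc2]; simp
    rw [show (k:Int) + 1 + (c.length:Int) - 1 = (k:Int) + (c2.length:Int) by rw [hlen]; ring]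
    rw [show (k:Int) + 1 - 1 = (k:Int) by ring]
    rw [show ((c.length:Int) - 1) = ((c2.length:Int) - 1) by rw [hlen]]
    exact ih c2 (by omega)
theorem pvAB_eq (h_ : String) :
    decode_embed_info h_ = decode_embed_info_alt h_ := by
  unfold decode_embed_info decode_embed_info_alt
  dsimp only
  set c0 := h_.toList.map (fun e => (((PySem.List.index? pvG e).getD 0 : Nat) : Int)) with hc0
  have hnn : ∀ x ∈ c0, 0 ≤ x := by
    intro x hx
    rw [hc0] at hx
    rcases List.mem_map.mp hx with ⟨e, _, he⟩
    exact he ▸ Int.natCast_nonneg _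
  by_cases hn : c0.length = 0
  · rw [List.length_eq_zero_iff] at hn
    rw [hn]
    simp [pvXorLoop, pvPass, pvFLoop, pvChunk]
  · have hpos : 0 < c0.length := Nat.pos_of_ne_zero hn
    have key : pvXorLoop c0 ((c0.length : Int) * 2 - 1)
        = pvPass (pvPass c0 ((c0.length : Int) - 1)) ((c0.length : Int) - 1) := by
      have h1 : (c0.length : Int) * 2 - 1 = ((c0.length - 1 : Nat) : Int) + (c0.length : Int) := by
        omega
      rw [h1, pvXorLoop_split (c0.length - 1) c0 (by omega)]
      rw [show ((c0.length - 1 : Nat) : Int) = (c0.length : Int) - 1 by omega]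
      exact pvXorLoop_eq_pass _ _ (by rw [pvPass_length]; omega)
    rw [key]
    rw [pvFLoop_eq_chunk _ (pvPass_nonneg _ (pvPass_nonneg _ hnn _) _)]

-- ===== VERDICT (by name: the statement is the Claim_ definition above) =====
theorem decode_embed_info_spec : Claim_equal_decode_embed_info := by
  intro h_ _ _
  exact pvAB_eq h_
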